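-- pv_equiv track=rewrite | github.com/jcole75/arc_2025_mindsai | src/modules/pipeline_orchestrator.py | _rebuild_aggregated_predictions
-- ===== SOURCE A (Python) =====
-- def _rebuild_aggregated_predictions(
--     per_model_store: dict,
--     model_ensemble_flags: list,
--     upto_model_idx: int,
--     all_task_keys: list,
-- ) -> dict:
--     agg = {k: [] for k in all_task_keys}
--     for mi in range(0, upto_model_idx + 1):
--         if mi not in per_model_store:
--             continue
--         include = model_ensemble_flags[mi] if mi < len(model_ensemble_flags) else True
--         if not include and upto_model_idx > 0:
--             continue
--         for tk, grids in per_model_store[mi].items():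
--             if tk in agg and grids:
--                 agg[tk].extend(grids)
--     return agg
-- ===== SOURCE B (Python) =====
-- def _rebuild_aggregated_predictions(
--     per_model_store: dict,
--     model_ensemble_flags: list,
--     upto_model_idx: int,
--     all_task_keys: list,
-- ) -> dict:
--     # Phase 1: which model indices participate.
--     included = []
--     for mi in range(0, upto_model_idx + 1):
--         if mi not in per_model_store:
--             continue
--         include = model_ensemble_flags[mi] if mi < len(model_ensemble_flags) else True
--         if include or upto_model_idx <= 0:
--             included.append(mi)
--     # Phase 2: task-major aggregation.
--     result = {}
--     for tk in all_task_keys: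
--         if tk in result:
--             continue
--         preds = []
--         for mi in included:
--             grids = per_model_store[mi].get(tk)
--             if grids:
--                 preds.extend(grids)
--         result[tk] = preds
--     return result
-- ===== Notes on version B (the rewrite author's own statement) =====
-- stated objective: alternative
-- what changed: A builds a dict of empty lists and mutates it model-by-model via each model's items(); B first computes the list of included model indices, then does a task-major pass building each task's full aggregate list in one go.
import Mathlib
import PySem

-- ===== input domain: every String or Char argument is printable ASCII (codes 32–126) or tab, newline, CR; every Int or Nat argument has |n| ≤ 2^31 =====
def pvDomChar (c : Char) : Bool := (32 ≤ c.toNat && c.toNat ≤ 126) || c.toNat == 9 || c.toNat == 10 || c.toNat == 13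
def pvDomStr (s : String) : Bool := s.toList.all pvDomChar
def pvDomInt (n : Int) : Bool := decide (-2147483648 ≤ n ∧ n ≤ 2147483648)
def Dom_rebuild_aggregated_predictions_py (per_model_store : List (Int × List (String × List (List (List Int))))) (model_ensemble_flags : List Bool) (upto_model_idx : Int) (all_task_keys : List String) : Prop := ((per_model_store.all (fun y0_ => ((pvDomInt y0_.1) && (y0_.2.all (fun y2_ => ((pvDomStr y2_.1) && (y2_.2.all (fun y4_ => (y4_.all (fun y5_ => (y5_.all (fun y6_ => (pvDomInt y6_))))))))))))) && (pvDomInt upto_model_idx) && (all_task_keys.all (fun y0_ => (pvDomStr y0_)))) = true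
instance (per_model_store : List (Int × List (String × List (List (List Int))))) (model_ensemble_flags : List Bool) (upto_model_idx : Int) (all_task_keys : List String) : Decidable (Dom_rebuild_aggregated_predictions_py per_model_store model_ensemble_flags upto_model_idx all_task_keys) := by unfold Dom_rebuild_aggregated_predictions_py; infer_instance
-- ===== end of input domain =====

-- B replaces A's model-major dict mutation loop with a two-phase task-major pass (first the
-- included model indices, then one aggregation per task key); objective: alternative decomposition,
-- same asymptotic cost. Equivalence is about the returned dict (A mutates only its own fresh dict).

-- ===== PORT A =====
def rebuild_aggregated_predictions_py (per_model_store : List (Int × List (String × List (List (List Int))))) (model_ensemble_flags : List Bool) (upto_model_idx : Int) (all_task_keys : List String) : List (String × List (List (List Int))) :=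
  -- agg = {k: [] for k in all_task_keys}
  let agg0 : PySem.Dict String (List (List (List Int))) :=
    all_task_keys.foldl (fun d k => d.insert k []) PySem.Dict.empty
  let agg :=
    (PySem.List.pyRange 0 (upto_model_idx + 1) 1).foldl (fun d mi =>
      if (per_model_store.find? (fun p => p.1 == mi)).isNone then d  -- mi not in per_model_store
      else
        let include_ : Bool :=
          if mi < (model_ensemble_flags.length : Int) then PySem.List.pyGetD model_ensemble_flags mi true
          else true
        if !include_ && decide (upto_model_idx > 0) then d
        else
          -- for tk, grids in per_model_store[mi].items(): if tk in agg and grids: agg[tk].extend(grids)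
          (((per_model_store.find? (fun p => p.1 == mi)).map (·.2)).getD []).foldl
            (fun d2 p => if d2.contains p.1 && !p.2.isEmpty then d2.modify p.1 [] (· ++ p.2) else d2) d)
      agg0
  agg.items

-- ===== PORT B =====
def rebuild_aggregated_predictions_py_alt (per_model_store : List (Int × List (String × List (List (List Int))))) (model_ensemble_flags : List Bool) (upto_model_idx : Int) (all_task_keys : List String) : List (String × List (List (List Int))) :=
  -- Phase 1: which model indices participate.
  let included : List Int :=
    (PySem.List.pyRange 0 (upto_model_idx + 1) 1).filter (fun mi =>
      (per_model_store.any (fun p => p.1 == mi)) &&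
      ((if mi < (model_ensemble_flags.length : Int) then PySem.List.pyGetD model_ensemble_flags mi true else true)
        || decide (upto_model_idx ≤ 0)))
  -- Phase 2: task-major aggregation.
  let result : PySem.Dict String (List (List (List Int))) :=
    all_task_keys.foldl (fun d tk =>
      if d.contains tk then d
      else
        d.insert tk (included.foldl (fun preds mi =>
          match (((per_model_store.find? (fun p => p.1 == mi)).map (·.2)).getD []).find? (fun q => q.1 == tk) with
          | some q => if q.2.isEmpty then preds else preds ++ q.2
          | none => preds) []))
      PySem.Dict.empty
  result.items

-- ===== PRECONDITION & SPEC =====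
-- Pre_ only requires the association lists standing for Python dicts to have pairwise-distinct keys:
-- a list with duplicate keys does not represent any Python dict, so no input A accepts is excluded.
def Pre_rebuild_aggregated_predictions_py (per_model_store : List (Int × List (String × List (List (List Int))))) (model_ensemble_flags : List Bool) (upto_model_idx : Int) (all_task_keys : List String) : Prop :=
  (per_model_store.map Prod.fst).Nodup ∧ ∀ p ∈ per_model_store, (p.2.map Prod.fst).Nodup
instance (per_model_store : List (Int × List (String × List (List (List Int))))) (model_ensemble_flags : List Bool) (upto_model_idx : Int) (all_task_keys : List String) : Decidable (Pre_rebuild_aggregated_predictions_py per_model_store model_ensemble_flags upto_model_idx all_task_keys) := by unfold Pre_rebuild_aggregated_predictions_py; infer_instance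

def pvWitness_rebuild_aggregated_predictions_py : (List (Int × List (String × List (List (List Int))))) × List Bool × Int × List String :=
  ([(0, [("a", [[[1]]])]), (1, [("a", [[[2]]]), ("b", [])])], [true, false], 1, ["a", "b", "a"])

def Spec_rebuild_aggregated_predictions_py (per_model_store : List (Int × List (String × List (List (List Int))))) (model_ensemble_flags : List Bool) (upto_model_idx : Int) (all_task_keys : List String) (out : List (String × List (List (List Int)))) : Prop := out = rebuild_aggregated_predictions_py_alt per_model_store model_ensemble_flags upto_model_idx all_task_keys
instance (per_model_store : List (Int × List (String × List (List (List Int))))) (model_ensemble_flags : List Bool) (upto_model_idx : Int) (all_task_keys : List String) (out : List (String × List (List (List Int)))) : Decidable (Spec_rebuild_aggregated_predictions_py per_model_store model_ensemble_flags upto_model_idx all_task_keys out) := by unfold Spec_rebuild_aggregated_predictions_py; infer_instance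

-- ===== CLAIM (what is proved, stated in full; the proofs are below) =====
def Claim_equal_rebuild_aggregated_predictions_py : Prop := ∀ (per_model_store : List (Int × List (String × List (List (List Int))))) (model_ensemble_flags : List Bool) (upto_model_idx : Int) (all_task_keys : List String), Dom_rebuild_aggregated_predictions_py per_model_store model_ensemble_flags upto_model_idx all_task_keys → Pre_rebuild_aggregated_predictions_py per_model_store model_ensemble_flags upto_model_idx all_task_keys → Spec_rebuild_aggregated_predictions_py per_model_store model_ensemble_flags upto_model_idx all_task_keys (rebuild_aggregated_predictions_py per_model_store model_ensemble_flags upto_model_idx all_task_keys)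

-- ===== LEMMAS AND PROOFS =====

def pvGval (itemsmi : List (String × List (List (List Int)))) (tk : String) : List (List (List Int)) :=
  match itemsmi.find? (fun q => q.1 == tk) with
  | some q => if q.2.isEmpty then [] else q.2
  | none => []
def pvProcA (d : PySem.Dict String (List (List (List Int)))) (itemsmi : List (String × List (List (List Int)))) : PySem.Dict String (List (List (List Int))) :=
  itemsmi.foldl (fun d2 p => if d2.contains p.1 && !p.2.isEmpty then d2.modify p.1 [] (· ++ p.2) else d2) d
lemma pvGval_eq_nil_of_not_mem (l : List (String × List (List (List Int)))) (tk : String)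
    (h : tk ∉ l.map Prod.fst) : pvGval l tk = [] := by
  unfold pvGval
  have hfind : l.find? (fun q => q.1 == tk) = none := by
    rw [List.find?_eq_none]; intro q hq hbeq
    exact h (beq_iff_eq.mp hbeq ▸ List.mem_map_of_mem hq)
  rw [hfind]
lemma pvProcA_keys (itemsmi : List (String × List (List (List Int)))) (d : PySem.Dict String (List (List (List Int)))) :
    (pvProcA d itemsmi).keys = d.keys := by
  induction itemsmi generalizing d with
  | nil => rfl
  | cons p rest ih =>
    show (pvProcA (if d.contains p.1 && !p.2.isEmpty then d.modify p.1 [] (· ++ p.2) else d) rest).keys = d.keys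
    rw [ih]
    by_cases hc : (d.contains p.1 && !p.2.isEmpty) = true
    · have hc1 : d.contains p.1 = true := (Bool.and_eq_true _ _ |>.mp hc).1
      simp [hc, PySem.Dict.modify, PySem.Dict.keys_insert_of_contains d _ hc1]
    · simp [hc]

lemma pvProcA_items (itemsmi : List (String × List (List (List Int))))
    (hmi : (itemsmi.map Prod.fst).Nodup) (d : PySem.Dict String (List (List (List Int)))) (hd : d.keys.Nodup) :
    (pvProcA d itemsmi).items = d.items.map (fun p => (p.1, p.2 ++ pvGval itemsmi p.1)) := by
  induction itemsmi generalizing d with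
  | nil =>
    simp [pvProcA, pvGval]
  | cons q rest ih =>
    rw [List.map_cons] at hmi
    have hqrest : q.1 ∉ rest.map Prod.fst := (List.nodup_cons.mp hmi).1
    have hrest : (rest.map Prod.fst).Nodup := (List.nodup_cons.mp hmi).2
    show (pvProcA (if d.contains q.1 && !q.2.isEmpty then d.modify q.1 [] (· ++ q.2) else d) rest).items = _
    by_cases hc : (d.contains q.1 && !q.2.isEmpty) = true
    · have hc1 : d.contains q.1 = true := (Bool.and_eq_true _ _ |>.mp hc).1
      have hne : q.2.isEmpty = false := by
        have := (Bool.and_eq_true _ _ |>.mp hc).2; simpa using this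
      rw [if_pos hc]
      have hkeys : (d.modify q.1 [] (· ++ q.2)).keys.Nodup := by
        rw [PySem.Dict.keys_modify, PySem.Dict.keys_insert_of_contains d _ hc1]; exact hd
      rw [ih hrest _ hkeys]
      rw [PySem.Dict.modify, PySem.Dict.items_insert_of_contains d _ hc1]
      rw [List.map_map]
      apply List.map_congr_left
      intro p hp
      by_cases hpq : p.1 = q.1
      · have hgd : d.getD q.1 [] = p.2 := by
          have : (q.1, p.2) ∈ d.items := by rw [← hpq]; exact hp
          exact PySem.Dict.getD_of_mem_items d this hd []
        simp only [Function.comp_apply, hpq, beq_self_eq_true, if_pos]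
        have hg1 : pvGval rest q.1 = [] := pvGval_eq_nil_of_not_mem rest q.1 hqrest
        have hg2 : pvGval (q :: rest) q.1 = q.2 := by
          unfold pvGval
          simp [hne]
        simp [hg1, hg2, hgd]
      · have hbq : (p.1 == q.1) = false := by simpa using hpq
        simp only [Function.comp_apply, hbq, if_neg Bool.false_ne_true]
        have : pvGval (q :: rest) p.1 = pvGval rest p.1 := by
          unfold pvGval
          simp [(by simpa using (Ne.symm hpq) : (q.1 == p.1) = false)]
        rw [this]
    · rw [if_neg hc]
      rw [ih hrest _ hd]
      apply List.map_congr_left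
      intro p hp
      by_cases hpq : p.1 = q.1
      · -- q.1 ∈ keys, so contains true; hence q.2 must be empty
        have hcont : d.contains q.1 = true := by
          rw [PySem.Dict.contains_iff_mem_keys]
          rw [← hpq]
          exact List.mem_map_of_mem hp
        have hemp : q.2.isEmpty = true := by
          by_contra hne
          exact hc (by simp [hcont, Bool.not_eq_true _ ▸ hne])
        have hg1 : pvGval rest p.1 = [] := pvGval_eq_nil_of_not_mem rest p.1 (hpq ▸ hqrest)
        have hg2 : pvGval (q :: rest) p.1 = [] := by
          unfold pvGval
          simp [(by simpa using hpq.symm : (q.1 == p.1) = true), hemp]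
        rw [hg1, hg2]
      · have : pvGval (q :: rest) p.1 = pvGval rest p.1 := by
          unfold pvGval
          simp [(by simpa using (Ne.symm hpq) : (q.1 == p.1) = false)]
        rw [this]

def pvStoreGet (per_model_store : List (Int × List (String × List (List (List Int))))) (mi : Int) : List (String × List (List (List Int))) :=
  ((per_model_store.find? (fun p => p.1 == mi)).map (·.2)).getD []
def pvProcList (per_model_store : List (Int × List (String × List (List (List Int))))) (d : PySem.Dict String (List (List (List Int)))) (incs : List Int) : PySem.Dict String (List (List (List Int))) :=
  incs.foldl (fun d mi => pvProcA d (pvStoreGet per_model_store mi)) d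
def pvContrib (per_model_store : List (Int × List (String × List (List (List Int))))) (incs : List Int) (tk : String) : List (List (List Int)) :=
  incs.flatMap (fun mi => pvGval (pvStoreGet per_model_store mi) tk)

lemma pvProcList_items (per_model_store : List (Int × List (String × List (List (List Int)))))
    (hstore : ∀ mi, ((pvStoreGet per_model_store mi).map Prod.fst).Nodup)
    (incs : List Int) (d : PySem.Dict String (List (List (List Int)))) (hd : d.keys.Nodup) :
    (pvProcList per_model_store d incs).items = d.items.map (fun p => (p.1, p.2 ++ pvContrib per_model_store incs p.1)) := by
  induction incs generalizing d with
  | nil => simp [pvProcList, pvContrib]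
  | cons mi rest ih =>
    show (pvProcList per_model_store (pvProcA d (pvStoreGet per_model_store mi)) rest).items = _
    have hk : (pvProcA d (pvStoreGet per_model_store mi)).keys.Nodup := by
      rw [pvProcA_keys]; exact hd
    rw [ih _ hk, pvProcA_items _ (hstore mi) _ hd, List.map_map]
    apply List.map_congr_left
    intro p _
    simp [pvContrib, List.flatMap_cons, List.append_assoc]

-- invariant of A's initial dict: every value is []
lemma pvAgg0_values (l : List String) (d : PySem.Dict String (List (List (List Int))))
    (h : ∀ p ∈ d.items, p.2 = ([] : List (List (List Int)))) :
    ∀ p ∈ (l.foldl (fun d k => d.insert k []) d).items, p.2 = ([] : List (List (List Int))) := by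
  induction l generalizing d with
  | nil => exact h
  | cons k rest ih =>
    refine ih _ (fun p hp => ?_)
    rcases (PySem.Dict.mem_items_insert d k [] p).mp hp with h1 | h2
    · rw [h1]
    · exact h p h2.1

-- B's guarded fold, related to A's initialisation fold through a key-determined value map
lemma pvFoldB_items (F : String → List (List (List Int))) (l : List String)
    (d e : PySem.Dict String (List (List (List Int))))
    (h : e.items = d.items.map (fun p => (p.1, F p.1))) :
    (l.foldl (fun d2 tk => if d2.contains tk then d2 else d2.insert tk (F tk)) e).items
      = (l.foldl (fun d2 k => d2.insert k []) d).items.map (fun p => (p.1, F p.1)) := by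
  induction l generalizing d e with
  | nil => exact h
  | cons k rest ih =>
    have hkeys : e.keys = d.keys := by
      show e.items.map Prod.fst = d.items.map Prod.fst
      rw [h, List.map_map]; rfl
    have hcont : e.contains k = d.contains k := by
      rw [PySem.Dict.contains_eq_decide_mem_keys, PySem.Dict.contains_eq_decide_mem_keys, hkeys]
    show (rest.foldl _ (if e.contains k then e else e.insert k (F k))).items = ((rest.foldl _ (d.insert k ([]:List (List (List Int))))).items).map _
    by_cases hc : d.contains k = true
    · rw [hcont, hc, if_pos rfl]
      apply ih
      rw [h, PySem.Dict.items_insert_of_contains d _ hc, List.map_map]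
      apply List.map_congr_left
      intro p _
      by_cases hpk : p.1 = k
      · simp [hpk]
      · simp [hpk]
    · have hc' : d.contains k = false := by simpa using hc
      rw [hcont, hc', if_neg Bool.false_ne_true]
      apply ih
      rw [PySem.Dict.items_insert_of_not_contains d _ hc',
          PySem.Dict.items_insert_of_not_contains e _ (by rw [hcont]; exact hc'),
          List.map_append, h]
      rfl

-- the common "included model" predicate (B's filter)
def pvPred (per_model_store : List (Int × List (String × List (List (List Int))))) (model_ensemble_flags : List Bool) (upto_model_idx : Int) (mi : Int) : Bool :=
  (per_model_store.any (fun p => p.1 == mi)) &&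
  ((if mi < (model_ensemble_flags.length : Int) then PySem.List.pyGetD model_ensemble_flags mi true else true)
    || decide (upto_model_idx ≤ 0))

lemma pvStepA_eq (per_model_store : List (Int × List (String × List (List (List Int))))) (model_ensemble_flags : List Bool) (upto_model_idx : Int) :
    (fun (d : PySem.Dict String (List (List (List Int)))) mi =>
      if (per_model_store.find? (fun p => p.1 == mi)).isNone then d
      else
        let include_ : Bool :=
          if mi < (model_ensemble_flags.length : Int) then PySem.List.pyGetD model_ensemble_flags mi true
          else true
        if !include_ && decide (upto_model_idx > 0) then d
        else
          (((per_model_store.find? (fun p => p.1 == mi)).map (·.2)).getD []).foldl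
            (fun d2 p => if d2.contains p.1 && !p.2.isEmpty then d2.modify p.1 [] (· ++ p.2) else d2) d)
    = fun d mi => if pvPred per_model_store model_ensemble_flags upto_model_idx mi then pvProcA d (pvStoreGet per_model_store mi) else d := by
  funext d mi
  simp only
  by_cases hf : (per_model_store.find? (fun p => p.1 == mi)).isNone = true
  · have hany : per_model_store.any (fun p => p.1 == mi) = false := by
      rw [← List.isSome_find?]
      simpa [Option.isNone_iff_eq_none] using hf
    rw [if_pos hf]
    rw [if_neg (by simp [pvPred, hany])]
  · have hsome : (per_model_store.find? (fun p => p.1 == mi)).isNone = false := by simpa using hf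
    have hany : per_model_store.any (fun p => p.1 == mi) = true := by
      rw [← List.isSome_find?]
      cases h : per_model_store.find? (fun p => p.1 == mi) with
      | none => rw [h] at hsome; simp at hsome
      | some v => simp
    rw [if_neg hf]
    have hdec : decide (upto_model_idx ≤ 0) = !decide (upto_model_idx > 0) := by
      by_cases h : upto_model_idx ≤ 0
      · have h2 : ¬ upto_model_idx > 0 := by omega
        simp [h, h2]
      · have h2 : upto_model_idx > 0 := by omega
        simp [h, h2]
    rw [pvPred, hany, hdec]
    generalize (if mi < (model_ensemble_flags.length : Int) then PySem.List.pyGetD model_ensemble_flags mi true else true) = b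
    generalize decide (upto_model_idx > 0) = c
    cases b <;> cases c <;> simp [pvProcA, pvStoreGet]

lemma pvInnerB_eq (per_model_store : List (Int × List (String × List (List (List Int))))) (tk : String) (incs : List Int) :
    incs.foldl (fun preds mi =>
      match (((per_model_store.find? (fun p => p.1 == mi)).map (·.2)).getD []).find? (fun q => q.1 == tk) with
      | some q => if q.2.isEmpty then preds else preds ++ q.2
      | none => preds) []
    = pvContrib per_model_store incs tk := by
  have hstep : (fun (preds : List (List (List Int))) mi =>
      match (((per_model_store.find? (fun p => p.1 == mi)).map (·.2)).getD []).find? (fun q => q.1 == tk) with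
      | some q => if q.2.isEmpty then preds else preds ++ q.2
      | none => preds)
      = fun preds mi => preds ++ pvGval (pvStoreGet per_model_store mi) tk := by
    funext preds mi
    unfold pvGval pvStoreGet
    cases h : (((per_model_store.find? (fun p => p.1 == mi)).map (·.2)).getD []).find? (fun q => q.1 == tk) with
    | none => simp
    | some q =>
      by_cases he : q.2.isEmpty = true
      · simp [he]
      · simp [he]
  rw [hstep, PySem.List.foldl_append_eq_flatMap]
  rfl

lemma pvStoreGet_nodup (per_model_store : List (Int × List (String × List (List (List Int)))))
    (hPre : ∀ p ∈ per_model_store, (p.2.map Prod.fst).Nodup) (mi : Int) :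
    ((pvStoreGet per_model_store mi).map Prod.fst).Nodup := by
  unfold pvStoreGet
  cases h : per_model_store.find? (fun p => p.1 == mi) with
  | none => simp
  | some p =>
    simpa using hPre p (List.mem_of_find?_eq_some h)


-- ===== VERDICT (by name: the statement is the Claim_ definition above) =====
theorem rebuild_aggregated_predictions_py_spec : Claim_equal_rebuild_aggregated_predictions_py := by
  intro store flags upto keys _hDom hPre
  unfold Pre_rebuild_aggregated_predictions_py at hPre
  unfold Spec_rebuild_aggregated_predictions_py rebuild_aggregated_predictions_py rebuild_aggregated_predictions_py_alt
  simp only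
  have hfilter : (fun mi => (store.any (fun p => p.1 == mi)) && ((if mi < (flags.length : Int) then PySem.List.pyGetD flags mi true else true) || decide (upto ≤ 0))) = pvPred store flags upto := rfl
  rw [hfilter]
  set incs : List Int := (PySem.List.pyRange 0 (upto + 1) 1).filter (pvPred store flags upto) with hincs
  -- A side
  have hA : (PySem.List.pyRange 0 (upto + 1) 1).foldl (fun d mi =>
          if (store.find? (fun p => p.1 == mi)).isNone then d
          else
            let include_ : Bool :=
              if mi < (flags.length : Int) then PySem.List.pyGetD flags mi true
              else true
            if !include_ && decide (upto > 0) then d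
            else
              (((store.find? (fun p => p.1 == mi)).map (·.2)).getD []).foldl
                (fun d2 p => if d2.contains p.1 && !p.2.isEmpty then d2.modify p.1 [] (· ++ p.2) else d2) d)
          (keys.foldl (fun d k => d.insert k []) PySem.Dict.empty)
      = pvProcList store (keys.foldl (fun d k => d.insert k []) PySem.Dict.empty) incs := by
    rw [pvStepA_eq store flags upto]
    rw [hincs, pvProcList, List.foldl_filter]
  rw [hA]
  have hnodup0 : (keys.foldl (fun d k => d.insert k []) (PySem.Dict.empty : PySem.Dict String (List (List (List Int))))).keys.Nodup := by
    exact PySem.Dict.nodup_keys_foldl_insert keys (fun _ _ => []) PySem.Dict.empty (by simp)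
  rw [pvProcList_items store (pvStoreGet_nodup store hPre.2) incs _ hnodup0]
  -- B side
  have hinner : (fun (d : PySem.Dict String (List (List (List Int)))) tk =>
      if d.contains tk then d
      else d.insert tk (incs.foldl (fun preds mi =>
          match (((store.find? (fun p => p.1 == mi)).map (·.2)).getD []).find? (fun q => q.1 == tk) with
          | some q => if q.2.isEmpty then preds else preds ++ q.2
          | none => preds) []))
      = fun d tk => if d.contains tk then d else d.insert tk (pvContrib store incs tk) := by
    funext d tk
    rw [pvInnerB_eq]
  rw [hinner]
  rw [pvFoldB_items (pvContrib store incs) keys PySem.Dict.empty PySem.Dict.empty (by rfl)]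
  apply Eq.symm
  apply List.map_congr_left
  intro p hp
  have hval : p.2 = [] := pvAgg0_values keys PySem.Dict.empty (by simp [PySem.Dict.empty]) p hp
  simp [hval]
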